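-- pv_equiv track=rewrite | github.com/wyatt-marshall/phone-and-email | phoneAndEmail.py | dups
-- ===== SOURCE A (Python) =====
-- def dups(lst):
--     noDups = []
--     for string in lst:
--         if string not in noDups:
--             noDups.append(string)
--
--
--     for x in range(len(noDups)):
--         count = lst.count(noDups[x])
--         if count != 1:
--             noDups[x] = noDups[x] + ' ({})'.format(count)
--
--     return noDups
-- ===== SOURCE B (Python) =====
-- def dups(lst):
--     result = []
--     rest = list(lst)
--     while rest:
--         head = rest[0]
--         count = rest.count(head)
--         result.append(head + ' ({})'.format(count) if count != 1 else head)
--         rest = [x for x in rest if x != head]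
--     return result
-- ===== Notes on version B (the rewrite author's own statement) =====
-- stated objective: alternative
-- what changed: Replaces A's two staged passes (membership-test dedup list, then per-index lst.count rescans with in-place annotation) by a single shrinking-worklist loop: repeatedly take the head of the remaining list, count it there, emit its (possibly annotated) entry, and filter all its occurrences out of the worklist; no seen-list, no dict, no second pass.
import Mathlib
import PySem

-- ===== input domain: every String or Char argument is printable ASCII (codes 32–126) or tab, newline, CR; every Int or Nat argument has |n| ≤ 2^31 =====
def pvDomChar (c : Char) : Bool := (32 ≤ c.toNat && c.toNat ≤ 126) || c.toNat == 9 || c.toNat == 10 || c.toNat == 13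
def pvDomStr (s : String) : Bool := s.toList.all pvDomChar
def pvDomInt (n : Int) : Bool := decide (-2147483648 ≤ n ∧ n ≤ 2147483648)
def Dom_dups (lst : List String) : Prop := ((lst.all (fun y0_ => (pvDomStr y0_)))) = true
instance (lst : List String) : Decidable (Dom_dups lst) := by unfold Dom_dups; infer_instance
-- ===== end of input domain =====

-- B replaces A's staged dedup-then-rescan passes by one shrinking-worklist loop that emits
-- each head with its count and filters its occurrences out (alternative decomposition).

-- ===== PORT A =====
-- second loop of A: 'for x in range(len(noDups)): … noDups[x] = noDups[x] + " ({})".format(count)'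
-- ported as an index recursion over the mutated list (the in-range guard is a totality guard only)
-- fuel = number of remaining loop iterations, a pure totality guard (list length is invariant)
def dupsAnnot (lst : List String) (nd : List String) (x : Nat) : Nat → List String
  | 0 => nd
  | fuel + 1 =>
      if h : x < nd.length then
        let count : Int := (lst.count nd[x] : Int)
        let nd' := if count ≠ 1 then nd.set x (nd[x] ++ " (" ++ PySem.Int.toStr count ++ ")") else nd
        dupsAnnot lst nd' (x + 1) fuel
      else nd

def dups (lst : List String) : List String :=
  let noDups := lst.foldl (fun acc s => if acc.contains s then acc else acc ++ [s]) []
  dupsAnnot lst noDups 0 noDups.length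

-- ===== PORT B =====
-- 'while rest: head = rest[0]; count = rest.count(head); result.append(…); rest = [x for x in rest if x != head]'
-- fuel = an upper bound on the remaining iterations (each one strictly shrinks the worklist),
-- a pure totality guard; with fuel = lst.length the 0 case is never reached
def dupsAltLoop (result : List String) (rest : List String) : Nat → List String
  | 0 => result
  | fuel + 1 =>
      match rest with
      | [] => result
      | head :: tail =>
          let count : Int := ((head :: tail).count head : Int)
          let entry := if count ≠ 1 then head ++ " (" ++ PySem.Int.toStr count ++ ")" else head
          dupsAltLoop (result ++ [entry]) ((head :: tail).filter (fun x => x ≠ head)) fuel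

def dups_alt (lst : List String) : List String :=
  dupsAltLoop [] lst lst.length

-- ===== PRECONDITION & SPEC =====
def Spec_dups (lst : List String) (out : List String) : Prop := out = dups_alt lst
instance (lst : List String) (out : List String) : Decidable (Spec_dups lst out) := by unfold Spec_dups; infer_instance

-- ===== CLAIM (what is proved, stated in full; the proofs are below) =====
def Claim_equal_dups : Prop := ∀ (lst : List String), Dom_dups lst → Spec_dups lst (dups lst)

-- ===== LEMMAS AND PROOFS =====

-- the annotation applied to one already-deduplicated element
def annotF (lst : List String) (s : String) : String :=
  if (lst.count s : Int) ≠ 1 then s ++ " (" ++ PySem.Int.toStr (lst.count s : Int) ++ ")" else s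

-- invariant of A's index loop: it maps annotF over the unprocessed suffix
lemma dupsAnnot_eq_map (lst : List String) : ∀ (fuel x : Nat) (nd : List String),
    nd.length ≤ x + fuel →
    dupsAnnot lst nd x fuel = nd.take x ++ (nd.drop x).map (annotF lst) := by
  intro fuel
  induction fuel with
  | zero =>
      intro x nd hle
      have hx : nd.length ≤ x := by omega
      rw [List.take_of_length_le hx, List.drop_of_length_le hx]
      simp [dupsAnnot]
  | succ fuel ih =>
      intro x nd hle
      simp only [dupsAnnot]
      split
      · next h =>
        by_cases hc : (lst.count nd[x] : Int) ≠ 1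
        · simp only [if_pos hc]
          rw [ih (x + 1) _ (by simp only [List.length_set]; omega)]
          rw [List.take_set, List.take_succ_eq_append_getElem h]
          rw [show nd.drop x = nd[x] :: nd.drop (x + 1) from List.drop_eq_getElem_cons h]
          have hd : (nd.set x (nd[x] ++ " (" ++ PySem.Int.toStr (lst.count nd[x] : Int) ++ ")")).drop (x + 1)
              = nd.drop (x + 1) := by
            rw [List.drop_set, if_pos (by omega)]
          rw [hd]
          have hs : (nd.take x ++ [nd[x]]).set x (nd[x] ++ " (" ++ PySem.Int.toStr (lst.count nd[x] : Int) ++ ")")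
              = nd.take x ++ [nd[x] ++ " (" ++ PySem.Int.toStr (lst.count nd[x] : Int) ++ ")"] := by
            rw [List.set_append_right _ _ (by simp [Nat.min_eq_left (le_of_lt h)])]
            simp [Nat.min_eq_left (le_of_lt h)]
          rw [hs]
          simp only [List.map_cons, annotF, if_pos hc, List.append_assoc, List.singleton_append]
        · simp only [if_neg hc]
          rw [ih (x + 1) _ (by omega)]
          rw [show nd.drop x = nd[x] :: nd.drop (x + 1) from List.drop_eq_getElem_cons h,
              List.take_succ_eq_append_getElem h]
          simp only [List.map_cons, annotF, if_neg hc, List.append_assoc, List.singleton_append]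
      · next h =>
        have hx : nd.length ≤ x := by omega
        rw [List.take_of_length_le hx, List.drop_of_length_le hx]
        simp

lemma foldl_dedup_eq_ofList (lst : List String) :
    lst.foldl (fun acc s => if acc.contains s then acc else acc ++ [s]) [] = PySem.Set.ofList lst := by
  rfl

-- the accumulator of PySem.Set's foldl is always a prefix of the result
lemma foldl_add_prefix (t : List String) : ∀ (acc : List String),
    acc <+: t.foldl PySem.Set.add acc := by
  induction t with
  | nil => intro acc; exact List.prefix_rfl
  | cons x t ih =>
      intro acc
      refine List.IsPrefix.trans ?_ (ih (PySem.Set.add acc x))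
      unfold PySem.Set.add
      split
      · exact List.prefix_rfl
      · exact List.prefix_append _ _

-- first-occurrence dedup commutes with filtering
lemma foldl_add_filter (p : String → Bool) : ∀ (t acc : List String),
    (t.filter p).foldl PySem.Set.add (acc.filter p)
      = (t.foldl PySem.Set.add acc).filter p := by
  intro t
  induction t with
  | nil => intro acc; rfl
  | cons a t ih =>
      intro acc
      have hc1 : (PySem.Set.contains acc a = true) ↔ a ∈ acc := by
        simp [PySem.Set.contains]
      have hc2 : (PySem.Set.contains (acc.filter p) a = true) ↔ a ∈ acc.filter p := by
        simp [PySem.Set.contains]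
      by_cases hp : p a
      · have hstep : List.filter p (PySem.Set.add acc a) = PySem.Set.add (List.filter p acc) a := by
          unfold PySem.Set.add
          by_cases hmem : a ∈ acc
          · rw [if_pos (hc1.mpr hmem),
                if_pos (hc2.mpr (List.mem_filter.mpr (And.intro hmem hp)))]
          · rw [if_neg (fun hcon => hmem (hc1.mp hcon)),
                if_neg (fun hcon => hmem (List.mem_filter.mp (hc2.mp hcon)).1)]
            simp [List.filter_append, hp]
        rw [List.filter_cons]
        split
        · simp only [List.foldl_cons]
          rw [← ih (PySem.Set.add acc a), hstep]
        · next hcond => exact absurd hp hcond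
      · have hstep : List.filter p (PySem.Set.add acc a) = List.filter p acc := by
          unfold PySem.Set.add
          split
          · rfl
          · simp [List.filter_append, hp]
        rw [List.filter_cons]
        split
        · next hcond => exact absurd hcond hp
        · simp only [List.foldl_cons]
          rw [← ih (PySem.Set.add acc a), hstep]

lemma dedup_filter (p : String → Bool) (l : List String) :
    PySem.List.dedup (l.filter p) = (PySem.List.dedup l).filter p := by
  simpa using foldl_add_filter p l []

-- peeling the head off a dedup: the remaining dedup is the dedup of the head-free rest
lemma dedup_cons_filter (h : String) (t : List String) :
    PySem.List.dedup (h :: t)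
      = h :: PySem.List.dedup ((h :: t).filter (fun x => x ≠ h)) := by
  obtain ⟨xs, hxs⟩ := foldl_add_prefix t [h]
  have hded : PySem.List.dedup (h :: t) = h :: xs := by
    simpa [PySem.List.dedup, PySem.Set.ofList, PySem.Set.add] using hxs.symm
  have hnd : (h :: xs).Nodup := hded ▸ PySem.List.nodup_dedup (h :: t)
  rw [dedup_filter, hded]
  have hx : xs.filter (fun x => decide (x ≠ h)) = xs := by
    refine List.filter_eq_self.mpr (fun x hxm => ?_)
    simp only [decide_eq_true_eq]
    exact fun he => (List.nodup_cons.mp hnd).1 (he ▸ hxm)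
  have htail : (h :: xs).filter (fun x => decide (x ≠ h)) = xs := by
    rw [List.filter_cons]
    split
    · next hcond => simp at hcond
    · exact hx
  rw [htail]

-- B's worklist loop emits annotF over the first occurrences, provided counts in the
-- worklist agree with counts in the original list and the fuel bounds the worklist length
lemma dupsAltLoop_eq (lst : List String) : ∀ (fuel : Nat) (rest acc : List String),
    rest.length ≤ fuel →
    (∀ x ∈ rest, rest.count x = lst.count x) →
    dupsAltLoop acc rest fuel = acc ++ (PySem.List.dedup rest).map (annotF lst) := by
  intro fuel
  induction fuel with
  | zero =>
      intro rest acc hle hcnt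
      have : rest = [] := List.eq_nil_of_length_eq_zero (by omega)
      subst this
      simp [dupsAltLoop, PySem.List.dedup, PySem.Set.ofList]
  | succ fuel ih =>
      intro rest acc hle hcnt
      rcases rest with _ | ⟨h, t⟩
      · simp [dupsAltLoop, PySem.List.dedup, PySem.Set.ofList]
      · have hch : (h :: t).count h = lst.count h := hcnt h (by simp)
        have hlef : ((h :: t).filter (fun x => x ≠ h)).length ≤ t.length := by
          rw [List.filter_cons]
          split
          · next hcond => simp at hcond
          · exact List.length_filter_le _ _
        have hcnt' : ∀ x ∈ (h :: t).filter (fun x => x ≠ h),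
            ((h :: t).filter (fun x => x ≠ h)).count x = lst.count x := by
          intro x hxm
          have hxp := List.mem_filter.mp hxm
          have hxne : x ≠ h := by simpa using hxp.2
          rw [List.count_filter (by simp [hxne]), hcnt x hxp.1]
        simp only [dupsAltLoop]
        rw [ih _ _ (by simp only [List.length_cons] at hle; omega) hcnt']
        rw [dedup_cons_filter]
        simp only [List.map_cons, annotF, hch, List.append_assoc, List.singleton_append]

-- ===== VERDICT (by name: the statement is the Claim_ definition above) =====
theorem dups_spec : Claim_equal_dups := by
  intro lst _
  unfold Spec_dups dups dups_alt
  rw [foldl_dedup_eq_ofList, dupsAnnot_eq_map lst _ 0 _ (by omega)]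
  rw [dupsAltLoop_eq lst lst.length lst [] le_rfl (fun x _ => rfl)]
  simp [PySem.List.dedup]
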